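-- pv_equiv track=rewrite | github.com/pastarobber/coding_study | 프로그래머스/1/12930. 이상한 문자 만들기/이상한 문자 만들기.py | solution
-- ===== SOURCE A (Python) =====
-- def solution(s):
--     answer = []
--     words = s.split(" ")  # 공백 기준으로 나눔
--     for word in words:
--         new_word = ""
--         for i in range(len(word)):
--             if i % 2 == 0:  # 짝수 인덱스
--                 new_word += word[i].upper()
--             else:           # 홀수 인덱스
--                 new_word += word[i].lower()
--         answer.append(new_word)  # 처리된 단어를 결과에 추가
--     return " ".join(answer)  # 단어를 다시 공백으로 연결
-- ===== SOURCE B (Python) =====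
-- def solution(s):
--     out = []
--     counter = 0
--     for ch in s:
--         if ch == ' ':
--             out.append(' ')
--             counter = 0
--         else:
--             out.append(ch.upper() if counter % 2 == 0 else ch.lower())
--             counter += 1
--     return ''.join(out)
-- ===== Notes on version B (the rewrite author's own statement) =====
-- stated objective: simpler
-- what changed: Replaces split-into-words plus a nested index loop and a join by a single pass over the characters with a per-word position counter that resets on every space.
import Mathlib
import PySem

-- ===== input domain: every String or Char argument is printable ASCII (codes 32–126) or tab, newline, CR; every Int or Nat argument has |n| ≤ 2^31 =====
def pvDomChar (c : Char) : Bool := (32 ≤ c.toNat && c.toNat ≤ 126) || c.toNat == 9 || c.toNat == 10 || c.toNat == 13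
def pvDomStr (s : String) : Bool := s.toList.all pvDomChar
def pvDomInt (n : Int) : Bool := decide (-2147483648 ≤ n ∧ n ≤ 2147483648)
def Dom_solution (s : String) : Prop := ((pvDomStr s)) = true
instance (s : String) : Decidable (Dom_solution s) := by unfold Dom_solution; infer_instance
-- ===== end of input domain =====

-- B replaces split-into-words + nested index loop + join by a single pass with a
-- per-word position counter that resets on every space (same output, simpler shape).

-- ===== PORT A =====
def solution (s : String) : String :=
  let words := PySem.Chars.splitOn s.toList [' ']
  let answer := words.foldl (fun acc word =>
    acc ++ [ (PySem.List.pyRange 0 (word.length : Int)).foldl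
        (fun nw i =>
          match PySem.List.pyGet? word i with
          | some ch =>
              nw ++ [ if PySem.Int.mod i 2 == 0 then PySem.Chars.upperChar ch
                      else PySem.Chars.lowerChar ch ]
          | none => nw) ([] : List Char) ]) ([] : List (List Char))
  String.mk (PySem.Chars.join [' '] answer)

-- ===== PORT B =====
def solution_alt (s : String) : String :=
  let r := s.toList.foldl (fun (p : List Char × Nat) c =>
      if c = ' ' then (p.1 ++ [' '], 0)
      else (p.1 ++ [if p.2 % 2 = 0 then PySem.Chars.upperChar c
                    else PySem.Chars.lowerChar c], p.2 + 1))
    (([] : List Char), (0 : Nat))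
  String.mk r.1

-- ===== PRECONDITION & SPEC =====
def Spec_solution (s : String) (out : String) : Prop := out = solution_alt s
instance (s : String) (out : String) : Decidable (Spec_solution s out) := by unfold Spec_solution; infer_instance

-- ===== CLAIM (what is proved, stated in full; the proofs are below) =====
def Claim_equal_solution : Prop := ∀ (s : String), Dom_solution s → Spec_solution s (solution s)

-- ===== LEMMAS AND PROOFS =====

-- the transform applied to the character at per-word position k
def pvG (c : Char) (k : Nat) : Char :=
  if k % 2 = 0 then PySem.Chars.upperChar c else PySem.Chars.lowerChar c

-- per-word processing starting at position k
def pvProc : List Char → Nat → List Char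
  | [], _ => []
  | c :: cs, k => pvG c k :: pvProc cs (k + 1)

-- one-pass processing with counter k (B's semantics)
def pvF : List Char → Nat → List Char
  | [], _ => []
  | c :: cs, k => if c = ' ' then ' ' :: pvF cs 0 else pvG c k :: pvF cs (k + 1)

-- structural split on a single space
def pvSplit : List Char → List (List Char)
  | [] => [[]]
  | c :: cs =>
      if c = ' ' then [] :: pvSplit cs
      else
        match pvSplit cs with
        | [] => [[c]]
        | w :: ws => (c :: w) :: ws

-- head-with-parity map over the split
def pvProcMapK : List (List Char) → Nat → List (List Char)
  | [], _ => []
  | w :: ws, k => pvProc w k :: ws.map (pvProc · 0)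

theorem pvModifyHead_id {α : Type} (l : List α) : l.modifyHead (fun x => x) = l := by
  cases l <;> simp

theorem pvSplit_ne_nil (cs : List Char) : pvSplit cs ≠ [] := by
  cases cs with
  | nil => simp [pvSplit]
  | cons c cs =>
      simp only [pvSplit]
      split
      · simp
      · split <;> simp

theorem pvGo_eq (fuel : Nat) (l cur : List Char) (acc : List (List Char))
    (h : l.length ≤ fuel) :
    PySem.Chars.splitOn.go [' '] fuel l cur acc
      = acc.reverse ++ (pvSplit l).modifyHead (cur.reverse ++ ·) := by
  induction fuel generalizing l cur acc with
  | zero =>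
      have : l = [] := by cases l <;> simp_all
      subst this
      simp [PySem.Chars.splitOn.go, pvSplit]
  | succ fuel ih =>
      cases l with
      | nil => simp [PySem.Chars.splitOn.go, pvSplit]
      | cons c rest =>
          simp only [PySem.Chars.splitOn.go]
          by_cases hc : c = ' '
          · subst hc
            have hp : List.isPrefixOf [' '] (' ' :: rest) = true := by
              simp [List.isPrefixOf]
            rw [if_pos hp]
            have hd : List.drop [' '].length (' ' :: rest) = rest := rfl
            rw [hd]
            simp only [List.length_cons] at h
            rw [ih _ _ _ (by omega)]
            simp [pvSplit, pvModifyHead_id]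
          · have hp : List.isPrefixOf [' '] (c :: rest) = false := by
              simp [List.isPrefixOf, Ne.symm hc]
            rw [if_neg (by simp [hp])]
            simp only [List.length_cons] at h
            rw [ih _ _ _ (by omega)]
            simp only [pvSplit, if_neg hc]
            rcases hw : pvSplit rest with _ | ⟨w, ws⟩
            · exact absurd hw (pvSplit_ne_nil rest)
            · simp

theorem pvSplitOn_eq (cs : List Char) :
    PySem.Chars.splitOn cs [' '] = pvSplit cs := by
  have := pvGo_eq (cs.length + 1) cs [] [] (by omega)
  simpa [PySem.Chars.splitOn, pvModifyHead_id] using this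

theorem pvProc_snoc (xs : List Char) (x : Char) (k : Nat) :
    pvProc (xs ++ [x]) k = pvProc xs k ++ [pvG x (k + xs.length)] := by
  induction xs generalizing k with
  | nil => simp [pvProc]
  | cons c cs ih =>
      simp only [List.cons_append, pvProc, ih, List.length_cons]
      simp [Nat.add_comm, Nat.add_assoc, Nat.add_left_comm]

theorem pvRange_nat (n : Nat) :
    PySem.List.pyRange 0 (n : Int) = (List.range n).map (Nat.cast : Nat → Int) := by
  simp only [PySem.List.pyRange]
  norm_num
  rcases Nat.eq_zero_or_pos n with h | h
  · subst h; simp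
  · simp [h]

theorem pvModInt (n : Nat) : (PySem.Int.mod (n : Int) 2 == 0) = (n % 2 == 0) := by
  rcases Nat.even_or_odd n with ⟨m, hm⟩ | ⟨m, hm⟩ <;> subst hm <;>
    simp [PySem.Int.mod, Int.fmod_eq_emod, Int.add_mul_emod_self_left, Nat.add_mul_mod_self_left] <;>
    omega

theorem pvInner_eq (w : List Char) :
    (PySem.List.pyRange 0 (w.length : Int)).foldl
        (fun nw i =>
          match PySem.List.pyGet? w i with
          | some ch =>
              nw ++ [ if PySem.Int.mod i 2 == 0 then PySem.Chars.upperChar ch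
                      else PySem.Chars.lowerChar ch ]
          | none => nw) ([] : List Char)
      = pvProc w 0 := by
  rw [pvRange_nat, List.foldl_map]
  have key : ∀ n, n ≤ w.length →
      (List.range n).foldl
        (fun nw (j : Nat) =>
          match PySem.List.pyGet? w (j : Int) with
          | some ch =>
              nw ++ [ if PySem.Int.mod (j : Int) 2 == 0 then PySem.Chars.upperChar ch
                      else PySem.Chars.lowerChar ch ]
          | none => nw) ([] : List Char)
      = pvProc (w.take n) 0 := by
    intro n hn
    induction n with
    | zero => simp [pvProc]
    | succ m ih =>
        rw [List.range_succ, List.foldl_append, ih (by omega)]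
        have hm : m < w.length := by omega
        have hg : PySem.List.pyGet? w ((m : Nat) : Int) = some w[m] := by
          rw [PySem.List.pyGet?_natCast]
          simp [hm]
        simp only [List.foldl_cons, List.foldl_nil, hg]
        rw [List.take_succ]
        simp only [List.getElem?_eq_getElem hm, Option.toList_some]
        rw [pvProc_snoc]
        have hlen : (w.take m).length = m := by simp [hm.le]
        rw [hlen, pvModInt]
        by_cases hpar : m % 2 = 0 <;> simp [pvG, hpar]
  have := key w.length le_rfl
  simpa using this

theorem pvFoldlMap {α : Type} (h : α → List Char) (l : List α) (acc : List (List Char)) :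
    l.foldl (fun a w => a ++ [h w]) acc = acc ++ l.map h := by
  induction l generalizing acc with
  | nil => simp
  | cons x xs ih => simp [ih]

theorem pvJoin_cons_inner (a : Char) (x : List Char) (ws : List (List Char)) :
    PySem.Chars.join [' '] ((a :: x) :: ws) = a :: PySem.Chars.join [' '] (x :: ws) := by
  cases ws with
  | nil => simp [PySem.Chars.join_singleton]
  | cons y ys => rw [PySem.Chars.join_cons_cons, PySem.Chars.join_cons_cons]; simp

theorem pvJoinK (cs : List Char) (k : Nat) :
    PySem.Chars.join [' '] (pvProcMapK (pvSplit cs) k) = pvF cs k := by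
  induction cs generalizing k with
  | nil => simp [pvSplit, pvProcMapK, pvProc, pvF, PySem.Chars.join_singleton]
  | cons c cs ih =>
      rcases hw : pvSplit cs with _ | ⟨w, ws⟩
      · exact absurd hw (pvSplit_ne_nil cs)
      by_cases hc : c = ' '
      · subst hc
        have h0 := ih 0
        rw [hw] at h0
        simp only [pvProcMapK] at h0
        have hsp : pvSplit (' ' :: cs) = [] :: w :: ws := by simp [pvSplit, hw]
        have hpf : pvF (' ' :: cs) k = ' ' :: pvF cs 0 := by simp [pvF]
        rw [hsp, hpf]
        show PySem.Chars.join [' ']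
            ([] :: pvProc w 0 :: List.map (fun x => pvProc x 0) ws) = ' ' :: pvF cs 0
        rw [PySem.Chars.join_cons_cons]
        simp only [List.nil_append, List.singleton_append]
        rw [h0]
      · have h1 := ih (k + 1)
        rw [hw] at h1
        simp only [pvProcMapK] at h1
        have hsp : pvSplit (c :: cs) = (c :: w) :: ws := by simp [pvSplit, hc, hw]
        have hpf : pvF (c :: cs) k = pvG c k :: pvF cs (k + 1) := by simp [pvF, hc]
        rw [hsp, hpf]
        show PySem.Chars.join [' ']
            ((pvG c k :: pvProc w (k + 1)) :: List.map (fun x => pvProc x 0) ws)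
          = pvG c k :: pvF cs (k + 1)
        rw [pvJoin_cons_inner, h1]

theorem pvB_fold (cs : List Char) (acc : List Char) (k : Nat) :
    (cs.foldl (fun (p : List Char × Nat) c =>
      if c = ' ' then (p.1 ++ [' '], 0)
      else (p.1 ++ [if p.2 % 2 = 0 then PySem.Chars.upperChar c
                    else PySem.Chars.lowerChar c], p.2 + 1)) (acc, k)).1
      = acc ++ pvF cs k := by
  induction cs generalizing acc k with
  | nil => simp [pvF]
  | cons c cs ih =>
      by_cases hc : c = ' '
      · subst hc; simp [pvF, ih]
      · simp only [List.foldl_cons, if_neg hc, pvF, ih]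
        by_cases hpar : k % 2 = 0 <;> simp [pvG, hpar, hc]

-- ===== VERDICT (by name: the statement is the Claim_ definition above) =====
theorem solution_spec : Claim_equal_solution := by
  intro s _
  unfold Spec_solution solution solution_alt
  simp only [pvSplitOn_eq, pvFoldlMap, List.nil_append]
  rw [pvB_fold s.toList [] 0, List.nil_append]
  have hmap : (pvSplit s.toList).map
      (fun word => (PySem.List.pyRange 0 (word.length : Int)).foldl
        (fun nw i =>
          match PySem.List.pyGet? word i with
          | some ch =>
              nw ++ [ if PySem.Int.mod i 2 == 0 then PySem.Chars.upperChar ch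
                      else PySem.Chars.lowerChar ch ]
          | none => nw) ([] : List Char))
      = pvProcMapK (pvSplit s.toList) 0 := by
    rcases hw : pvSplit s.toList with _ | ⟨w, ws⟩
    · exact absurd hw (pvSplit_ne_nil _)
    · simp only [List.map_cons, pvProcMapK]
      rw [pvInner_eq]
      congr 1
      exact List.map_congr_left (fun a _ => pvInner_eq a)
  rw [hmap, pvJoinK]
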